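-- pv_equiv track=rewrite | github.com/dogatekin/aoc-2022 | 25/25.py | convert
-- ===== SOURCE A (Python) =====
-- def convert(snafu):
--     d = 0
--     i = 1
--     for c in reversed(snafu):
--         if c == '-':
--             v = -1
--         elif c == '=':
--             v = -2
--         else:
--             v = int(c)
--         d += i * v
--         i *= 5
--     return d
-- ===== SOURCE B (Python) =====
-- def convert(snafu):
--     d = 0
--     for c in snafu:
--         if c == '=':
--             v = -2
--         elif c == '-':
--             v = -1
--         else:
--             v = int(c)
--         d = d * 5 + v
--     return d
-- ===== Notes on version B (the rewrite author's own statement) =====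
-- stated objective: simpler
-- what changed: Horner's method scanning the string forwards with one multiply-accumulate accumulator, eliminating A's reversed traversal and the power-of-5 multiplier variable.
import Mathlib
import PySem

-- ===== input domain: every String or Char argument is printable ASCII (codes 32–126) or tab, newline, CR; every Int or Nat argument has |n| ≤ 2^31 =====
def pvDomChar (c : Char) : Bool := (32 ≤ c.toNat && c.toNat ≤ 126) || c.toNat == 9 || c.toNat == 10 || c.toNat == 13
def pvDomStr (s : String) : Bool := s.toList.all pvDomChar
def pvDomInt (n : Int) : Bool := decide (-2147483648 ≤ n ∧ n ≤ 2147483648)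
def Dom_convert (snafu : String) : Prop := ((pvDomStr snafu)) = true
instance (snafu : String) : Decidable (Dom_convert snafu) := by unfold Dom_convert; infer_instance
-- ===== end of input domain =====

-- B replaces A's reversed traversal with a power-of-5 counter by a forward Horner scan
-- (single accumulator d = d*5 + digit); objective: simpler.

-- ===== PORT A =====
-- digit value of one character, as A computes it: '-' → -1, '=' → -2, else int(c)
-- (int(c) raises ValueError on other non-digits; those inputs are outside Pre_convert,
-- there the port uses the PySem none-default 0)
def convertVal (c : Char) : Int :=
  if c = '-' then -1
  else if c = '=' then -2
  else (PySem.Int.ofStr? (String.mk [c])).getD 0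

def convertStep (s : Int × Int) (c : Char) : Int × Int :=
  (s.1 + s.2 * convertVal c, s.2 * 5)

def convert (snafu : String) : Int :=
  (snafu.toList.reverse.foldl convertStep (0, 1)).1

-- ===== PORT B =====
-- B's digit value: '=' → -2, '-' → -1, else int(c)
def convertAltVal (c : Char) : Int :=
  if c = '=' then -2
  else if c = '-' then -1
  else (PySem.Int.ofStr? (String.mk [c])).getD 0

def convert_alt (snafu : String) : Int :=
  snafu.toList.foldl (fun d c => d * 5 + convertAltVal c) 0

-- ===== PRECONDITION & SPEC =====
-- Pre_ excludes exactly the inputs where Python's int(c) raises ValueError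
-- (a character that is neither '-', '=' nor an ASCII digit); both A and B raise there.
def Pre_convert (snafu : String) : Prop :=
  (snafu.toList.all (fun c => c == '-' || c == '=' || ('0' ≤ c && c ≤ '9'))) = true
instance (snafu : String) : Decidable (Pre_convert snafu) := by unfold Pre_convert; infer_instance

def pvWitness_convert : String := "2=-01"

def Spec_convert (snafu : String) (out : Int) : Prop := out = convert_alt snafu
instance (snafu : String) (out : Int) : Decidable (Spec_convert snafu out) := by unfold Spec_convert; infer_instance

-- ===== CLAIM (what is proved, stated in full; the proofs are below) =====
def Claim_equal_convert : Prop := ∀ (snafu : String), Dom_convert snafu → Pre_convert snafu → Spec_convert snafu (convert snafu)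

-- ===== LEMMAS AND PROOFS =====

theorem convertVal_eq_alt (c : Char) : convertVal c = convertAltVal c := by
  unfold convertVal convertAltVal
  by_cases h1 : c = '-' <;> by_cases h2 : c = '=' <;> simp [h1, h2]

-- S m = Σ_k convertVal m[k] * 5^k, via foldr
def convertSum (m : List Char) : Int :=
  m.foldr (fun c a => convertVal c + 5 * a) 0

theorem convert_foldl_eq (m : List Char) : ∀ d i : Int,
    m.foldl convertStep (d, i) = (d + i * convertSum m, i * 5 ^ m.length) := by
  induction m with
  | nil => intro d i; simp [convertSum]
  | cons c t ih =>
      intro d i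
      simp only [List.foldl_cons, convertStep, ih, convertSum, List.foldr_cons,
        List.length_cons]
      rw [Prod.mk.injEq]
      constructor <;> ring

theorem convertSum_append (m : List Char) (c : Char) :
    convertSum (m ++ [c]) = convertSum m + convertVal c * 5 ^ m.length := by
  induction m with
  | nil => simp [convertSum]
  | cons x t ih =>
      simp only [convertSum, List.cons_append, List.foldr_cons, List.length_cons] at *
      rw [ih]; ring

theorem convert_alt_foldl_eq (l : List Char) : ∀ a : Int,
    l.foldl (fun d c => d * 5 + convertAltVal c) a
      = a * 5 ^ l.length + convertSum l.reverse := by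
  have hf : convertAltVal = convertVal := funext fun c => (convertVal_eq_alt c).symm
  rw [hf]
  induction l with
  | nil => intro a; simp [convertSum]
  | cons c t ih =>
      intro a
      simp only [List.foldl_cons, ih, List.reverse_cons, convertSum_append,
        List.length_reverse, List.length_cons]
      ring

-- ===== VERDICT (by name: the statement is the Claim_ definition above) =====
theorem convert_spec : Claim_equal_convert := by
  intro snafu _ _
  unfold Spec_convert convert convert_alt
  rw [convert_foldl_eq, convert_alt_foldl_eq]
  simp
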